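-- pv_equiv track=rewrite | github.com/DoctorEmmetBrown/popcorn | popcorn/stitching.py | rearrange_folders_list
-- ===== SOURCE A (Python) =====
-- def rearrange_folders_list(starting_position, number_of_lines, number_of_columns):
--     """Sorts indices of multiple-tiles image based on starting position and size of the grid
--
--     Args:
--         starting_position (str): Position of first tile (either top-left, top-right, bottom-left or bottom-right)
--         number_of_lines (int):   Number of lines in the final grid
--         number_of_columns (int): Number of columns in the final grid
--
--     Returns (list[int]): list of sorted indices
--
--     """
--     list_of_folders = list(range(0, number_of_lines * number_of_columns))
--     for nb_line in range(number_of_lines):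
--         if (nb_line + ("left" in starting_position) * 1) % 2 == 0:
--             list_of_folders[nb_line * number_of_columns: nb_line * number_of_columns + number_of_columns] = \
--                 list(reversed(
--                     list_of_folders[nb_line * number_of_columns: nb_line * number_of_columns + number_of_columns]))
--
--     if "bottom" in starting_position:
--         new_list_of_folders = list(range(1, number_of_lines * number_of_columns + 1))
--         for nb_line in range(number_of_lines):
--             if nb_line * number_of_columns > 0:
--                 new_list_of_folders[nb_line * number_of_columns:
--                                     nb_line * number_of_columns + number_of_columns] = \
--                     list_of_folders[-(nb_line * number_of_columns + number_of_columns):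
--                                     -(nb_line * number_of_columns)]
--             else:
--                 new_list_of_folders[nb_line * number_of_columns:
--                                     nb_line * number_of_columns + number_of_columns] = \
--                     list_of_folders[-(nb_line * number_of_columns + number_of_columns):]
--     else:
--         new_list_of_folders = list_of_folders
--     return new_list_of_folders
-- ===== SOURCE B (Python) =====
-- def rearrange_folders_list(starting_position, number_of_lines, number_of_columns):
--     left = 1 if "left" in starting_position else 0
--     bottom = "bottom" in starting_position
--     result = []
--     for r in range(number_of_lines):
--         sr = number_of_lines - 1 - r if bottom else r
--         base = sr * number_of_columns
--         if (sr + left) % 2 == 0: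
--             result.extend(range(base + number_of_columns - 1, base - 1, -1))
--         else:
--             result.extend(range(base, base + number_of_columns))
--     return result
-- ===== Notes on version B (the rewrite author's own statement) =====
-- stated objective: simpler
-- what changed: B computes each tile index directly row by row in one pass (source row + parity decide the emitted arithmetic sequence) instead of A's build-a-flat-range, reverse-slices-in-place, then rebuild-via-negative-slices two-phase construction. Pre_ excludes only the degenerate grids with both dimensions negative (no-tile grids outside the natural domain), where L*C > 0 makes A return a leftover range list while B returns the empty list.
-- outside the precondition, e.g. on rearrange_folders_list('top-left', -1, -1): A returns [0], B returns []; on rearrange_folders_list('bottom-left', -2, -3): A returns [1, 2, 3, 4, 5, 6], B returns []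
import Mathlib
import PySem

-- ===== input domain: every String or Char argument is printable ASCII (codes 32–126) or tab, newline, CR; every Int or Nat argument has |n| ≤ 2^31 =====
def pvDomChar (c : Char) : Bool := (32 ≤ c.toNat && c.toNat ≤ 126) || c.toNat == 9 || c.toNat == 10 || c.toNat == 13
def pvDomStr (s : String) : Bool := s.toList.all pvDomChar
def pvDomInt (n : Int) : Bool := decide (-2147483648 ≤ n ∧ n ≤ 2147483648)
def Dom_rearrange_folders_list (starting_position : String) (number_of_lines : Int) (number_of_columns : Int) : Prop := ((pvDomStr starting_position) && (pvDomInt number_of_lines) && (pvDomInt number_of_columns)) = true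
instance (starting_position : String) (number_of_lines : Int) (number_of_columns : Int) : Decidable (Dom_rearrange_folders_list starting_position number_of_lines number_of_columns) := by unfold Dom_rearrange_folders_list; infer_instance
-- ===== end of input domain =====

-- B computes each tile index directly, row by row in one pass, instead of A's two-phase
-- build / reverse-slices-in-place / rebuild-through-negative-slices construction (objective: simpler).

-- ===== PORT A =====
-- Python step-1 slice assignment `xs[a:b] = repl`, exact for arbitrary Int bounds:
-- both bounds are clamped like in slicing, and if the normalized stop lies before the
-- normalized start, the replaced range is empty and repl is inserted at the start.
def pySetSlice (xs : List Int) (a b : Int) (repl : List Int) : List Int :=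
  let ai := PySem.List.clampIdx xs.length a
  let bi := max ai (PySem.List.clampIdx xs.length b)
  xs.take ai ++ repl ++ xs.drop bi

def rearrange_folders_list (starting_position : String) (number_of_lines : Int) (number_of_columns : Int) : List Int :=
  let list_of_folders := PySem.List.pyRange 0 (number_of_lines * number_of_columns)
  let list_of_folders := (PySem.List.pyRange 0 number_of_lines).foldl (fun lof nb_line =>
      if (nb_line + (if PySem.Str.isIn "left" starting_position then 1 else 0) * 1) % 2 == 0 then
        pySetSlice lof (nb_line * number_of_columns) (nb_line * number_of_columns + number_of_columns)
          (PySem.List.slice lof (some (nb_line * number_of_columns))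
            (some (nb_line * number_of_columns + number_of_columns))).reverse
      else lof) list_of_folders
  if PySem.Str.isIn "bottom" starting_position then
    (PySem.List.pyRange 0 number_of_lines).foldl (fun nlof nb_line =>
      if nb_line * number_of_columns > 0 then
        pySetSlice nlof (nb_line * number_of_columns) (nb_line * number_of_columns + number_of_columns)
          (PySem.List.slice list_of_folders
            (some (-(nb_line * number_of_columns + number_of_columns)))
            (some (-(nb_line * number_of_columns))))
      else
        pySetSlice nlof (nb_line * number_of_columns) (nb_line * number_of_columns + number_of_columns)
          (PySem.List.slice list_of_folders
            (some (-(nb_line * number_of_columns + number_of_columns))) none))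
      (PySem.List.pyRange 1 (number_of_lines * number_of_columns + 1))
  else list_of_folders

-- ===== PORT B =====
def rearrange_folders_list_alt (starting_position : String) (number_of_lines : Int) (number_of_columns : Int) : List Int :=
  let left : Int := if PySem.Str.isIn "left" starting_position then 1 else 0
  let bottom := PySem.Str.isIn "bottom" starting_position
  (PySem.List.pyRange 0 number_of_lines).foldl (fun res r =>
    let sr := if bottom then number_of_lines - 1 - r else r
    let base := sr * number_of_columns
    if (sr + left) % 2 == 0 then
      res ++ PySem.List.pyRange (base + number_of_columns - 1) (base - 1) (-1)
    else
      res ++ PySem.List.pyRange base (base + number_of_columns)) []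

-- ===== PRECONDITION & SPEC =====
-- Pre_ excludes only the degenerate grids with BOTH dimensions negative — no-tile grids outside
-- the function's natural domain: there the product L*C is positive and A returns the leftover
-- list range(0,L*C) (or range(1,L*C+1) for bottom), while B naturally returns the empty list.
def Pre_rearrange_folders_list (starting_position : String) (number_of_lines : Int) (number_of_columns : Int) : Prop :=
  ¬ (number_of_lines < 0 ∧ number_of_columns < 0)
instance (starting_position : String) (number_of_lines : Int) (number_of_columns : Int) : Decidable (Pre_rearrange_folders_list starting_position number_of_lines number_of_columns) := by unfold Pre_rearrange_folders_list; infer_instance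

def pvWitness_rearrange_folders_list : String × Int × Int := ("top-left", 2, 3)

def Spec_rearrange_folders_list (starting_position : String) (number_of_lines : Int) (number_of_columns : Int) (out : List Int) : Prop := out = rearrange_folders_list_alt starting_position number_of_lines number_of_columns
instance (starting_position : String) (number_of_lines : Int) (number_of_columns : Int) (out : List Int) : Decidable (Spec_rearrange_folders_list starting_position number_of_lines number_of_columns out) := by unfold Spec_rearrange_folders_list; infer_instance

-- ===== CLAIM (what is proved, stated in full; the proofs are below) =====
def Claim_equal_rearrange_folders_list : Prop := ∀ (starting_position : String) (number_of_lines : Int) (number_of_columns : Int), Dom_rearrange_folders_list starting_position number_of_lines number_of_columns → Pre_rearrange_folders_list starting_position number_of_lines number_of_columns → Spec_rearrange_folders_list starting_position number_of_lines number_of_columns (rearrange_folders_list starting_position number_of_lines number_of_columns)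

-- ===== LEMMAS AND PROOFS =====

-- one grid row of tile indices, left to right
def pvRow (m sr : Nat) : List Int := PySem.List.pyRange (sr * m) (sr * m + m)
-- a row as it looks after A's first phase / as B emits it: reversed iff sr + left is even
def pvSerpRow (lb : Bool) (m sr : Nat) : List Int :=
  if ((sr : Int) + (if lb then 1 else 0)) % 2 == 0 then (pvRow m sr).reverse else pvRow m sr

lemma pvRow_length (m sr : Nat) : (pvRow m sr).length = m := by
  simp [pvRow, PySem.List.length_pyRange_one]

lemma pvSerpRow_length (lb : Bool) (m sr : Nat) : (pvSerpRow lb m sr).length = m := by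
  unfold pvSerpRow; split <;> split <;> simp [pvRow_length]

lemma pvFoldl_fix {α β : Type} {f : α → β → α} {a : α} (h : ∀ x, f a x = a) :
    ∀ xs : List β, xs.foldl f a = a := by
  intro xs; induction xs with
  | nil => rfl
  | cons x xs ih => simp [List.foldl, h, ih]

-- block j of a concatenation of m-sized blocks
lemma pvSeg {g : Nat → List Int} {m : Nat} (hg : ∀ r, (g r).length = m) :
    ∀ (b a j : Nat), j < b →
      (((List.range' a b).flatMap g).drop (j * m)).take m = g (a + j) := by
  intro b
  induction b with
  | zero => intro a j h; omega
  | succ b ih =>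
    intro a j h
    rw [List.range'_succ, List.flatMap_cons]
    cases j with
    | zero => simpa using List.take_left' (hg a)
    | succ j =>
      have hlen : (j + 1) * m = (g a).length + j * m := by rw [hg]; ring
      rw [hlen, List.drop_append, List.drop_eq_nil_of_le (by omega), Nat.add_sub_cancel_left,
        List.nil_append, ih (a+1) j (by omega)]
      congr 1; omega

lemma pvFlatMap_length {g : Nat → List Int} {m : Nat} (hg : ∀ r, (g r).length = m) :
    ∀ (b a : Nat), ((List.range' a b).flatMap g).length = b * m := by
  intro b
  induction b with
  | zero => intro a; simp
  | succ b ih => intro a; rw [List.range'_succ, List.flatMap_cons, List.length_append, hg, ih]; ring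

-- the block A's negative two-ended slice reads (row n-1-k), for k ≥ 1
lemma pvNegSlice {g : Nat → List Int} {m : Nat} (hg : ∀ r, (g r).length = m) (hm : 0 < m)
    (n k : Nat) (hk : k < n) (hk1 : 1 ≤ k) :
    PySem.List.slice ((List.range' 0 n).flatMap g)
      (some (-((k : Int) * (m : Int) + (m : Int)))) (some (-((k : Int) * (m : Int))))
    = g (n - 1 - k) := by
  have hlen : ((List.range' 0 n).flatMap g).length = n * m := pvFlatMap_length hg n 0
  have hc1 : (-((k : Int) * (m : Int) + (m : Int))) = -(((k * m + m : Nat) : Int)) := by push_cast; ring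
  have hc2 : (-((k : Int) * (m : Int))) = -(((k * m : Nat) : Int)) := by push_cast; ring
  have hkm1 : k * m + m ≤ n * m := by
    have := Nat.mul_le_mul_right m (show k + 1 ≤ n by omega)
    simpa [Nat.succ_mul] using this
  rw [hc1, hc2]
  simp only [PySem.List.slice]
  rw [hlen, PySem.List.clampIdx_neg_natCast _ _ (by positivity),
    PySem.List.clampIdx_neg_natCast _ _ (by positivity)]
  have heq : n * m - (k * m + m) = (n - 1 - k) * m := by
    have h2 : (n - 1 - k) * m = (n - (k + 1)) * m := by congr 1; omega
    rw [h2, Nat.sub_mul, Nat.succ_mul]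
  have htake : n * m - k * m - (n * m - (k * m + m)) = m := by omega
  rw [htake, heq]
  simpa using pvSeg hg n 0 (n - 1 - k) (by omega)

-- the block A's open-ended negative slice reads at nb_line = 0 (the last row)
lemma pvNegSliceLast {g : Nat → List Int} {m : Nat} (hg : ∀ r, (g r).length = m) (hm : 0 < m)
    (n : Nat) (hn : 0 < n) :
    PySem.List.slice ((List.range' 0 n).flatMap g)
      (some (-((0 : Int) * (m : Int) + (m : Int)))) none
    = g (n - 1) := by
  have hlen : ((List.range' 0 n).flatMap g).length = n * m := pvFlatMap_length hg n 0
  have hc1 : (-((0 : Int) * (m : Int) + (m : Int))) = -(((m : Nat) : Int)) := by push_cast; ring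
  rw [hc1, PySem.List.slice_from_neg_natCast _ _ hm, hlen]
  have hx : (n - 1) * m + m = n * m := by
    have h1 : n - 1 + 1 = n := by omega
    calc (n - 1) * m + m = (n - 1 + 1) * m := by rw [Nat.succ_mul]
    _ = n * m := by rw [h1]
  have heq : n * m - m = (n - 1) * m := by omega
  rw [heq]
  have h1 : ((((List.range' 0 n).flatMap g).drop ((n - 1) * m)).take m) = g (n - 1) := by
    simpa using pvSeg hg n 0 (n - 1) (by omega)
  have h2 : (((List.range' 0 n).flatMap g).drop ((n - 1) * m)).length ≤ m := by
    rw [List.length_drop, hlen]; omega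
  rw [← List.take_of_length_le h2, h1]

-- A's first loop: reversing every even-parity row of range(0, n*m) in place yields the
-- concatenation of the serpentine rows
lemma pvPhase1 (lb : Bool) (n m : Nat) :
    ∀ (d k : Nat) (P cur : List Int), k + d = n → P.length = k * m →
      cur = P ++ PySem.List.pyRange ((k * m : Nat) : Int) ((n * m : Nat) : Int) →
      (PySem.List.pyRange (k : Int) (n : Int)).foldl (fun lof nb_line =>
          if (nb_line + (if lb then 1 else 0) * 1) % 2 == 0 then
            pySetSlice lof (nb_line * (m : Int)) (nb_line * (m : Int) + (m : Int))
              (PySem.List.slice lof (some (nb_line * (m : Int)))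
                (some (nb_line * (m : Int) + (m : Int)))).reverse
          else lof) cur
      = P ++ (List.range' k d).flatMap (pvSerpRow lb m) := by
  intro d
  induction d with
  | zero =>
    intro k P cur hk hP hcur
    have hkn : (n : Int) ≤ (k : Int) := by exact_mod_cast (by omega : n ≤ k)
    have hkm : ((k * m : Nat) : Int) = ((n * m : Nat) : Int) := by
      have : k = n := by omega
      rw [this]
    rw [PySem.List.pyRange_one_eq_nil hkn]
    simp [hcur, hkm, PySem.List.pyRange_one_eq_nil (le_refl ((n * m : Nat) : Int))]
  | succ d ih =>
    intro k P cur hk hP hcur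
    have hkm1 : k * m + m ≤ n * m := by
      have := Nat.mul_le_mul_right m (show k + 1 ≤ n by omega)
      simpa [Nat.succ_mul] using this
    have hkm0 : k * m ≤ k * m + m := Nat.le_add_right _ _
    have hkn : (k : Int) < (n : Int) := by exact_mod_cast (by omega : k < n)
    rw [PySem.List.pyRange_one_cons hkn, List.foldl_cons]
    have hsplit : PySem.List.pyRange ((k * m : Nat) : Int) ((n * m : Nat) : Int)
        = PySem.List.pyRange ((k * m : Nat) : Int) ((k * m + m : Nat) : Int)
          ++ PySem.List.pyRange ((k * m + m : Nat) : Int) ((n * m : Nat) : Int) := by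
      apply PySem.List.pyRange_one_append <;> exact_mod_cast ‹_›
    have hlen2 : (PySem.List.pyRange ((k * m : Nat) : Int) ((k * m + m : Nat) : Int)).length = m := by
      rw [PySem.List.length_pyRange_one]; push_cast; omega
    have hcurlen : cur.length = n * m := by
      rw [hcur, List.length_append, hP, PySem.List.length_pyRange_one]
      have : k * m ≤ n * m := le_trans hkm0 hkm1
      push_cast; omega
    have hcast : ((k : Int)) * (m : Int) = ((k * m : Nat) : Int) := by push_cast; ring
    have hcast2 : ((k : Int)) * (m : Int) + (m : Int) = ((k * m : Nat) : Int) + ((m : Nat) : Int) := by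
      push_cast; ring
    have hrow : pvRow m k = PySem.List.pyRange ((k * m : Nat) : Int) ((k * m + m : Nat) : Int) := by
      unfold pvRow; push_cast; ring_nf
    have hread : PySem.List.slice cur (some ((k : Int) * (m : Int)))
        (some ((k : Int) * (m : Int) + (m : Int)))
        = pvRow m k := by
      rw [hcast2, hcast, PySem.List.slice_natCast_add, hcur, List.drop_left' hP, hsplit,
        List.take_left' hlen2, hrow]
    have hwrite : ∀ repl : List Int,
        pySetSlice cur ((k : Int) * (m : Int)) ((k : Int) * (m : Int) + (m : Int)) repl
        = P ++ repl ++ PySem.List.pyRange ((k * m + m : Nat) : Int) ((n * m : Nat) : Int) := by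
      intro repl
      simp only [pySetSlice]
      rw [hcurlen, hcast2, hcast]
      have ecast : ((k * m : Nat) : Int) + ((m : Nat) : Int) = ((k * m + m : Nat) : Int) := by
        push_cast; ring
      have e1 : PySem.List.clampIdx (n * m) ((k * m : Nat) : Int) = k * m := by
        rw [PySem.List.clampIdx_natCast]; omega
      have e2 : PySem.List.clampIdx (n * m) (((k * m : Nat) : Int) + ((m : Nat) : Int)) = k * m + m := by
        rw [ecast, PySem.List.clampIdx_natCast]; omega
      rw [e1, e2]
      have emax : max (k * m) (k * m + m) = k * m + m := by omega
      rw [emax, hcur, List.take_left' hP, hsplit, ← List.append_assoc,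
        List.drop_left' (by rw [List.length_append, hP, hlen2])]
    have hstep : (if ((k : Int) + (if lb then 1 else 0) * 1) % 2 == 0 then
          pySetSlice cur ((k : Int) * (m : Int)) ((k : Int) * (m : Int) + (m : Int))
            (PySem.List.slice cur (some ((k : Int) * (m : Int)))
              (some ((k : Int) * (m : Int) + (m : Int)))).reverse
        else cur)
        = (P ++ pvSerpRow lb m k) ++ PySem.List.pyRange (((k + 1) * m : Nat) : Int) ((n * m : Nat) : Int) := by
      have hsm : ((k + 1) * m : Nat) = k * m + m := by ring
      rw [hsm]
      by_cases hc : (((k : Int) + (if lb then 1 else 0)) % 2 == 0) = true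
      · rw [if_pos (by simpa [mul_one] using hc), hwrite, hread]
        unfold pvSerpRow
        rw [if_pos hc, List.append_assoc]
      · rw [if_neg (by simpa [mul_one] using hc)]
        unfold pvSerpRow
        rw [if_neg hc, hcur, hsplit, ← hrow, ← List.append_assoc]
    rw [hstep]
    have hk1 : ((k : Int) + 1) = ((k + 1 : Nat) : Int) := by push_cast; ring
    rw [hk1, ih (k + 1) (P ++ pvSerpRow lb m k) _ (by omega)
      (by rw [List.length_append, hP, pvSerpRow_length]; ring) rfl]
    rw [List.range'_succ, List.flatMap_cons, ← List.append_assoc]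

-- A's bottom loop: overwriting range(1, n*m+1) block by block with the negative slices of
-- the phase-1 result yields the rows in reversed order
lemma pvPhase2 {g : Nat → List Int} {m : Nat} (hg : ∀ r, (g r).length = m) (hm : 0 < m) (n : Nat) :
    ∀ (d k : Nat) (Q cur : List Int), k + d = n → Q.length = k * m →
      cur = Q ++ PySem.List.pyRange (((k * m : Nat) : Int) + 1) (((n * m : Nat) : Int) + 1) →
      (PySem.List.pyRange (k : Int) (n : Int)).foldl (fun nlof nb_line =>
          if nb_line * (m : Int) > 0 then
            pySetSlice nlof (nb_line * (m : Int)) (nb_line * (m : Int) + (m : Int))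
              (PySem.List.slice ((List.range' 0 n).flatMap g)
                (some (-(nb_line * (m : Int) + (m : Int)))) (some (-(nb_line * (m : Int)))))
          else
            pySetSlice nlof (nb_line * (m : Int)) (nb_line * (m : Int) + (m : Int))
              (PySem.List.slice ((List.range' 0 n).flatMap g)
                (some (-(nb_line * (m : Int) + (m : Int)))) none)) cur
      = Q ++ (List.range' k d).flatMap (fun r => g (n - 1 - r)) := by
  intro d
  induction d with
  | zero =>
    intro k Q cur hk hQ hcur
    have hkn : (n : Int) ≤ (k : Int) := by exact_mod_cast (by omega : n ≤ k)
    have hkm : ((k * m : Nat) : Int) = ((n * m : Nat) : Int) := by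
      have : k = n := by omega
      rw [this]
    rw [PySem.List.pyRange_one_eq_nil hkn]
    simp [hcur, hkm, PySem.List.pyRange_one_eq_nil (le_refl (((n * m : Nat) : Int) + 1))]
  | succ d ih =>
    intro k Q cur hk hQ hcur
    have hkm1 : k * m + m ≤ n * m := by
      have := Nat.mul_le_mul_right m (show k + 1 ≤ n by omega)
      simpa [Nat.succ_mul] using this
    have hkm0 : k * m ≤ k * m + m := Nat.le_add_right _ _
    have hkn : (k : Int) < (n : Int) := by exact_mod_cast (by omega : k < n)
    rw [PySem.List.pyRange_one_cons hkn, List.foldl_cons]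
    have hsplit : PySem.List.pyRange (((k * m : Nat) : Int) + 1) (((n * m : Nat) : Int) + 1)
        = PySem.List.pyRange (((k * m : Nat) : Int) + 1) (((k * m + m : Nat) : Int) + 1)
          ++ PySem.List.pyRange (((k * m + m : Nat) : Int) + 1) (((n * m : Nat) : Int) + 1) := by
      apply PySem.List.pyRange_one_append
      · have : ((k * m : Nat) : Int) ≤ ((k * m + m : Nat) : Int) := by exact_mod_cast hkm0
        omega
      · have : ((k * m + m : Nat) : Int) ≤ ((n * m : Nat) : Int) := by exact_mod_cast hkm1
        omega
    have hlen2 : (PySem.List.pyRange (((k * m : Nat) : Int) + 1) (((k * m + m : Nat) : Int) + 1)).length = m := by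
      rw [PySem.List.length_pyRange_one]; push_cast; omega
    have hcurlen : cur.length = n * m := by
      rw [hcur, List.length_append, hQ, PySem.List.length_pyRange_one]
      have : ((k * m : Nat) : Int) ≤ ((n * m : Nat) : Int) := by
        exact_mod_cast le_trans hkm0 hkm1
      push_cast; omega
    have hcast : ((k : Int)) * (m : Int) = ((k * m : Nat) : Int) := by push_cast; ring
    have hcast2 : ((k : Int)) * (m : Int) + (m : Int) = ((k * m : Nat) : Int) + ((m : Nat) : Int) := by
      push_cast; ring
    have hwrite : ∀ repl : List Int,
        pySetSlice cur ((k : Int) * (m : Int)) ((k : Int) * (m : Int) + (m : Int)) repl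
        = Q ++ repl ++ PySem.List.pyRange (((k * m + m : Nat) : Int) + 1) (((n * m : Nat) : Int) + 1) := by
      intro repl
      simp only [pySetSlice]
      rw [hcurlen, hcast2, hcast]
      have ecast : ((k * m : Nat) : Int) + ((m : Nat) : Int) = ((k * m + m : Nat) : Int) := by
        push_cast; ring
      have e1 : PySem.List.clampIdx (n * m) ((k * m : Nat) : Int) = k * m := by
        rw [PySem.List.clampIdx_natCast]; omega
      have e2 : PySem.List.clampIdx (n * m) (((k * m : Nat) : Int) + ((m : Nat) : Int)) = k * m + m := by
        rw [ecast, PySem.List.clampIdx_natCast]; omega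
      rw [e1, e2]
      have emax : max (k * m) (k * m + m) = k * m + m := by omega
      rw [emax, hcur, List.take_left' hQ, hsplit, ← List.append_assoc,
        List.drop_left' (by rw [List.length_append, hQ, hlen2])]
    have hstep : (if (k : Int) * (m : Int) > 0 then
          pySetSlice cur ((k : Int) * (m : Int)) ((k : Int) * (m : Int) + (m : Int))
            (PySem.List.slice ((List.range' 0 n).flatMap g)
              (some (-((k : Int) * (m : Int) + (m : Int)))) (some (-((k : Int) * (m : Int)))))
        else
          pySetSlice cur ((k : Int) * (m : Int)) ((k : Int) * (m : Int) + (m : Int))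
            (PySem.List.slice ((List.range' 0 n).flatMap g)
              (some (-((k : Int) * (m : Int) + (m : Int)))) none))
        = (Q ++ g (n - 1 - k)) ++ PySem.List.pyRange ((((k + 1) * m : Nat) : Int) + 1) (((n * m : Nat) : Int) + 1) := by
      have hsm : ((k + 1) * m : Nat) = k * m + m := by ring
      rw [hsm]
      rcases Nat.eq_zero_or_pos k with hk0 | hk1
      · subst hk0
        rw [if_neg (by simp), hwrite]
        simp only [Nat.cast_zero]
        rw [pvNegSliceLast hg hm n (by omega)]
        simp [List.append_assoc]
      · have hpos : (k : Int) * (m : Int) > 0 := by positivity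
        rw [if_pos hpos, hwrite, pvNegSlice hg hm n k (by omega) hk1, List.append_assoc]
    rw [hstep]
    have hk1 : ((k : Int) + 1) = ((k + 1 : Nat) : Int) := by push_cast; ring
    rw [hk1, ih (k + 1) (Q ++ g (n - 1 - k)) _ (by omega)
      (by rw [List.length_append, hQ, hg]; ring) rfl]
    rw [List.range'_succ, List.flatMap_cons, ← List.append_assoc]

lemma pvRowDesc (sr m : Nat) :
    PySem.List.pyRange ((sr : Int) * (m : Int) + (m : Int) - 1) ((sr : Int) * (m : Int) - 1) (-1)
    = (pvRow m sr).reverse := by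
  rw [PySem.List.pyRange_neg_one_eq_reverse]
  unfold pvRow
  have e1 : (sr : Int) * (m : Int) - 1 + 1 = (sr : Int) * (m : Int) := by ring
  have e2 : (sr : Int) * (m : Int) + (m : Int) - 1 + 1 = (sr : Int) * (m : Int) + (m : Int) := by ring
  rw [e1, e2]

-- B's single pass produces exactly the (possibly bottom-up) serpentine rows
lemma pvBChar (lb bb : Bool) (n m : Nat) :
    (PySem.List.pyRange (0 : Int) (n : Int)).foldl (fun res r =>
      if ((if bb then (n : Int) - 1 - r else r) + (if lb then 1 else 0)) % 2 == 0 then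
        res ++ PySem.List.pyRange
          ((if bb then (n : Int) - 1 - r else r) * (m : Int) + (m : Int) - 1)
          ((if bb then (n : Int) - 1 - r else r) * (m : Int) - 1) (-1)
      else
        res ++ PySem.List.pyRange ((if bb then (n : Int) - 1 - r else r) * (m : Int))
          ((if bb then (n : Int) - 1 - r else r) * (m : Int) + (m : Int))) []
    = (List.range' 0 n).flatMap (fun r => pvSerpRow lb m (if bb then n - 1 - r else r)) := by
  have hbody : (fun (res : List Int) (r : Int) =>
      if ((if bb then (n : Int) - 1 - r else r) + (if lb then 1 else 0)) % 2 == 0 then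
        res ++ PySem.List.pyRange
          ((if bb then (n : Int) - 1 - r else r) * (m : Int) + (m : Int) - 1)
          ((if bb then (n : Int) - 1 - r else r) * (m : Int) - 1) (-1)
      else
        res ++ PySem.List.pyRange ((if bb then (n : Int) - 1 - r else r) * (m : Int))
          ((if bb then (n : Int) - 1 - r else r) * (m : Int) + (m : Int)))
      = fun res r => res ++
        (if ((if bb then (n : Int) - 1 - r else r) + (if lb then 1 else 0)) % 2 == 0 then
          PySem.List.pyRange
            ((if bb then (n : Int) - 1 - r else r) * (m : Int) + (m : Int) - 1)
            ((if bb then (n : Int) - 1 - r else r) * (m : Int) - 1) (-1)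
        else
          PySem.List.pyRange ((if bb then (n : Int) - 1 - r else r) * (m : Int))
            ((if bb then (n : Int) - 1 - r else r) * (m : Int) + (m : Int))) := by
    funext res r
    by_cases hc : (((if bb then (n : Int) - 1 - r else r) + (if lb then 1 else 0)) % 2 == 0) = true
    · rw [if_pos hc, if_pos hc]
    · rw [if_neg hc, if_neg hc]
  rw [hbody, PySem.List.foldl_append_eq_flatMap, List.nil_append]
  have houter : ∀ (G : Int → List Int), List.flatMap G (PySem.List.pyRange 0 (n : Int))
      = List.flatMap (fun r : Nat => G (r : Int)) (List.range' 0 n) := by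
    intro G
    have h0 : ((n : Int) - 0).toNat = n := by omega
    rw [PySem.List.pyRange_one, h0, List.flatMap_map, List.range_eq_range']
    exact List.flatMap_congr (by intro x hx; norm_num)
  rw [houter]
  apply List.flatMap_congr
  intro r hr
  have hrn : r < n := by
    rcases List.mem_range'.mp hr with ⟨i, hi, rfl⟩
    omega
  have hsr : (if bb then (n : Int) - 1 - (r : Int) else (r : Int))
      = (((if bb then n - 1 - r else r : Nat)) : Int) := by
    cases bb <;> simp <;> omega
  rw [hsr]
  unfold pvSerpRow
  by_cases hc : ((((if bb then n - 1 - r else r : Nat) : Int) + (if lb then 1 else 0)) % 2 == 0) = true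
  · rw [if_pos hc, if_pos hc, pvRowDesc]
  · rw [if_neg hc, if_neg hc]
    unfold pvRow
    rfl

-- ===== VERDICT (by name: the statement is the Claim_ definition above) =====
theorem rearrange_folders_list_spec : Claim_equal_rearrange_folders_list := by
  intro sp L C _hdom hD
  unfold Pre_rearrange_folders_list at hD
  push_neg at hD
  show _ = _
  simp only [rearrange_folders_list, rearrange_folders_list_alt]
  generalize PySem.Str.isIn "left" sp = lb
  generalize PySem.Str.isIn "bottom" sp = bb
  by_cases hL : 0 < L
  case neg =>
    have hL0 : L ≤ 0 := by omega
    have hLC : L * C ≤ 0 := by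
      rcases lt_or_eq_of_le hL0 with h | h
      · have hC0 : 0 ≤ C := hD h
        nlinarith
      · subst h; simp
    rw [PySem.List.pyRange_one_eq_nil hL0, PySem.List.pyRange_one_eq_nil hLC,
      PySem.List.pyRange_one_eq_nil (show L * C + 1 ≤ 1 by omega)]
    cases bb <;> simp
  case pos =>
  by_cases hC : 0 < C
  case neg =>
    have hC0 : C ≤ 0 := by omega
    have hLC : L * C ≤ 0 := by nlinarith
    rw [PySem.List.pyRange_one_eq_nil hLC, PySem.List.pyRange_one_eq_nil (show L * C + 1 ≤ 1 by omega)]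
    have hA1 : ∀ x : Int, (if (x + (if lb then 1 else 0) * 1) % 2 == 0 then
        pySetSlice ([] : List Int) (x * C) (x * C + C)
          (PySem.List.slice ([] : List Int) (some (x * C)) (some (x * C + C))).reverse
      else ([] : List Int)) = [] := by
      intro x
      split <;> simp [pySetSlice, PySem.List.slice]
    simp only [pvFoldl_fix (f := fun (lof : List Int) (nb_line : Int) =>
      if (nb_line + (if lb then 1 else 0) * 1) % 2 == 0 then
        pySetSlice lof (nb_line * C) (nb_line * C + C)
          (PySem.List.slice lof (some (nb_line * C)) (some (nb_line * C + C))).reverse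
      else lof) (a := []) hA1]
    have hA2 : ∀ x : Int, (if x * C > 0 then
        pySetSlice ([] : List Int) (x * C) (x * C + C)
          (PySem.List.slice ([] : List Int) (some (-(x * C + C))) (some (-(x * C))))
      else
        pySetSlice ([] : List Int) (x * C) (x * C + C)
          (PySem.List.slice ([] : List Int) (some (-(x * C + C))) none)) = [] := by
      intro x
      split <;> simp [pySetSlice, PySem.List.slice]
    simp only [pvFoldl_fix (f := fun (nlof : List Int) (nb_line : Int) =>
      if nb_line * C > 0 then
        pySetSlice nlof (nb_line * C) (nb_line * C + C)
          (PySem.List.slice ([] : List Int) (some (-(nb_line * C + C))) (some (-(nb_line * C))))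
      else
        pySetSlice nlof (nb_line * C) (nb_line * C + C)
          (PySem.List.slice ([] : List Int) (some (-(nb_line * C + C))) none)) (a := []) hA2]
    have hB : ∀ x : Int, (if ((if bb then L - 1 - x else x) + (if lb then 1 else 0)) % 2 == 0 then
        ([] : List Int) ++ PySem.List.pyRange ((if bb then L - 1 - x else x) * C + C - 1)
          ((if bb then L - 1 - x else x) * C - 1) (-1)
      else
        ([] : List Int) ++ PySem.List.pyRange ((if bb then L - 1 - x else x) * C)
          ((if bb then L - 1 - x else x) * C + C)) = [] := by
      intro x
      have h1 := PySem.List.pyRange_neg_one_eq_nil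
        (a := (if bb then L - 1 - x else x) * C + C - 1)
        (b := (if bb then L - 1 - x else x) * C - 1) (by linarith)
      have h2 := PySem.List.pyRange_one_eq_nil
        (a := (if bb then L - 1 - x else x) * C)
        (b := (if bb then L - 1 - x else x) * C + C) (by linarith)
      simp only [List.nil_append, h1, h2, ite_self]
    simp only [pvFoldl_fix (f := fun (res : List Int) (r : Int) =>
      if ((if bb then L - 1 - r else r) + (if lb then 1 else 0)) % 2 == 0 then
        res ++ PySem.List.pyRange ((if bb then L - 1 - r else r) * C + C - 1)
          ((if bb then L - 1 - r else r) * C - 1) (-1)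
      else
        res ++ PySem.List.pyRange ((if bb then L - 1 - r else r) * C)
          ((if bb then L - 1 - r else r) * C + C)) (a := []) hB]
    cases bb <;> simp
  case pos =>
  obtain ⟨n, rfl⟩ : ∃ n : Nat, L = (n : Int) := ⟨L.toNat, (Int.toNat_of_nonneg hL.le).symm⟩
  obtain ⟨m, rfl⟩ : ∃ m : Nat, C = (m : Int) := ⟨C.toNat, (Int.toNat_of_nonneg hC.le).symm⟩
  have hn : 0 < n := by exact_mod_cast hL
  have hm : 0 < m := by exact_mod_cast hC
  have h1 := pvPhase1 lb n m n 0 [] (PySem.List.pyRange 0 ((n : Int) * (m : Int))) (by omega)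
    (by simp)
    (by rw [List.nil_append]; congr 1 <;> push_cast <;> ring)
  simp only [Nat.cast_zero, List.nil_append] at h1
  rw [h1, pvBChar lb bb n m]
  cases bb
  case false => simp
  case true =>
    have h2 := pvPhase2 (pvSerpRow_length lb m) hm n n 0 []
      (PySem.List.pyRange 1 ((n : Int) * (m : Int) + 1)) (by omega) (by simp)
      (by rw [List.nil_append]; congr 1 <;> push_cast <;> ring)
    simp only [Nat.cast_zero, List.nil_append] at h2
    simpa using h2
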